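-- pv_equiv track=rewrite | github.com/mnky9800n/streets-of-rainy-city | split_spritesheet.py | find_frame_ranges
-- ===== SOURCE A (Python) =====
-- def find_frame_ranges(empty_columns: list[bool], min_gap: int, min_width: int) -> list[tuple[int, int]]:
--     """
--     Find contiguous ranges of non-empty columns, treating runs of fewer than
--     min_gap empty columns as part of the same frame.
--
--     Returns a list of (start, end) column index pairs (end is exclusive).
--     """
--     n = len(empty_columns)
--
--     # First pass: mark columns as frame content vs. gap.
--     # A gap only counts as a separator if it's at least min_gap wide.
--     in_gap = [False] * n
--     gap_start = None
--
--     for x in range(n):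
--         if empty_columns[x]:
--             if gap_start is None:
--                 gap_start = x
--         else:
--             if gap_start is not None:
--                 gap_width = x - gap_start
--                 if gap_width >= min_gap:
--                     for g in range(gap_start, x):
--                         in_gap[g] = True
--                 gap_start = None
--
--     # Handle a trailing gap at the end of the image
--     if gap_start is not None:
--         gap_width = n - gap_start
--         if gap_width >= min_gap:
--             for g in range(gap_start, n):
--                 in_gap[g] = True
--
--     # Second pass: collect contiguous runs of non-gap columns
--     ranges: list[tuple[int, int]] = []
--     frame_start = None
--
--     for x in range(n):
--         if not in_gap[x]:
--             if frame_start is None: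
--                 frame_start = x
--         else:
--             if frame_start is not None:
--                 ranges.append((frame_start, x))
--                 frame_start = None
--
--     if frame_start is not None:
--         ranges.append((frame_start, n))
--
--     # Filter out frames that are too narrow to be real content
--     ranges = [(start, end) for start, end in ranges if (end - start) >= min_width]
--
--     return ranges
-- ===== SOURCE B (Python) =====
-- def find_frame_ranges(empty_columns: list[bool], min_gap: int, min_width: int) -> list[tuple[int, int]]:
--     """Run-length encode the columns, then one pass over the runs: a frame ends
--     only at an empty run of width >= min_gap."""
--     n = len(empty_columns)
--     # run-length encoding: (value, start, end) with end exclusive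
--     runs = []
--     i = 0
--     while i < n:
--         j = i + 1
--         while j < n and empty_columns[j] == empty_columns[i]:
--             j += 1
--         runs.append((empty_columns[i], i, j))
--         i = j
--     ranges = []
--     frame_start = None
--     for val, start, end in runs:
--         if val and end - start >= min_gap:
--             if frame_start is not None:
--                 ranges.append((frame_start, start))
--                 frame_start = None
--         else:
--             if frame_start is None:
--                 frame_start = start
--     if frame_start is not None:
--         ranges.append((frame_start, n))
--     return [(s, e) for s, e in ranges if e - s >= min_width]
-- ===== Notes on version B (the rewrite author's own statement) =====
-- stated objective: alternative
-- what changed: Replaces A's two column-level passes with an in_gap mask array by a run-length encoding of the columns followed by a single pass over the runs; the mask array and both column scans disappear.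
import Mathlib
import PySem

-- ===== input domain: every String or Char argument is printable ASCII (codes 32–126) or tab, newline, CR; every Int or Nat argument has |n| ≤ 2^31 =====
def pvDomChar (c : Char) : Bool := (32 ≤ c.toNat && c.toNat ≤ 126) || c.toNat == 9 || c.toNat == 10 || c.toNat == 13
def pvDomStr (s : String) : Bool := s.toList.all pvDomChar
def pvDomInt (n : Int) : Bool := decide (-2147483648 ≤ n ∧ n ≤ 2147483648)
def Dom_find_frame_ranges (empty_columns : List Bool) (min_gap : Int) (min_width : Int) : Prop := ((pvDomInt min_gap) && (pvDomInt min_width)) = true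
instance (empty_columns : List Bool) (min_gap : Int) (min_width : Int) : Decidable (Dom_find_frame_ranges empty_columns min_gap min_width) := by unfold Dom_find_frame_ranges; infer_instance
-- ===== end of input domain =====

-- B replaces A's two column-level passes (with an in_gap mask array) by a run-length
-- encoding of the columns and a single pass over the runs; same return value.

-- ===== PORT A =====
-- 'for x in range(n)' over a list with its indices, starting at index i
def pvEnumFrom {α : Type} (i : Nat) : List α → List (Nat × α)
  | [] => []
  | a :: l => (i, a) :: pvEnumFrom (i + 1) l

-- 'for g in range(a, b): in_gap[g] = True'
def pA_mark (g : List Bool) (a b : Nat) : List Bool :=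
  (List.range' a (b - a)).foldl (fun l i => l.set i true) g

-- one iteration of A's first loop; state = (in_gap, gap_start)
def pA_step1 (min_gap : Int) (s : List Bool × Option Nat) (xe : Nat × Bool) :
    List Bool × Option Nat :=
  if xe.2 then
    match s.2 with
    | none => (s.1, some xe.1)
    | some _ => s
  else
    match s.2 with
    | none => s
    | some gs =>
      if ((xe.1 : Int) - (gs : Int)) ≥ min_gap then (pA_mark s.1 gs xe.1, none)
      else (s.1, none)

-- A's first pass, including the trailing-gap fixup
def pA_pass1 (empty_columns : List Bool) (min_gap : Int) : List Bool :=
  let n := empty_columns.length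
  let st := (pvEnumFrom 0 empty_columns).foldl (pA_step1 min_gap) (List.replicate n false, none)
  match st.2 with
  | none => st.1
  | some gs =>
    if ((n : Int) - (gs : Int)) ≥ min_gap then pA_mark st.1 gs n else st.1

-- one iteration of A's second loop; state = (ranges, frame_start)
def pA_step2 (s : List (Int × Int) × Option Nat) (xg : Nat × Bool) :
    List (Int × Int) × Option Nat :=
  if !xg.2 then
    match s.2 with
    | none => (s.1, some xg.1)
    | some _ => s
  else
    match s.2 with
    | none => s
    | some f => (s.1 ++ [((f : Int), (xg.1 : Int))], none)

def find_frame_ranges (empty_columns : List Bool) (min_gap : Int) (min_width : Int) :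
    List (Int × Int) :=
  let n := empty_columns.length
  let in_gap := pA_pass1 empty_columns min_gap
  let st := (pvEnumFrom 0 in_gap).foldl pA_step2 ([], none)
  let ranges : List (Int × Int) :=
    match st.2 with
    | none => st.1
    | some f => st.1 ++ [((f : Int), (n : Int))]
  ranges.filter (fun p => decide (p.2 - p.1 ≥ min_width))

-- ===== PORT B =====
-- run-length encoding: (value, start, end) runs, end exclusive, starting at index i
def pB_rle : List Bool → Nat → List (Bool × Nat × Nat)
  | [], _ => []
  | v :: rest, i =>
    let k := (rest.takeWhile (fun b => b == v)).length
    (v, i, i + k + 1) :: pB_rle (rest.drop k) (i + k + 1)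
termination_by l _ => l.length
decreasing_by simp

-- one iteration of B's loop over the runs; state = (ranges, frame_start)
def pB_step (min_gap : Int) (s : List (Int × Int) × Option Nat) (r : Bool × Nat × Nat) :
    List (Int × Int) × Option Nat :=
  if r.1 && decide (((r.2.2 : Int) - (r.2.1 : Int)) ≥ min_gap) then
    match s.2 with
    | none => s
    | some f => (s.1 ++ [((f : Int), (r.2.1 : Int))], none)
  else
    match s.2 with
    | none => (s.1, some r.2.1)
    | some _ => s

def find_frame_ranges_alt (empty_columns : List Bool) (min_gap : Int) (min_width : Int) :
    List (Int × Int) :=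
  let n := empty_columns.length
  let st := (pB_rle empty_columns 0).foldl (pB_step min_gap) ([], none)
  let ranges : List (Int × Int) :=
    match st.2 with
    | none => st.1
    | some f => st.1 ++ [((f : Int), (n : Int))]
  ranges.filter (fun p => decide (p.2 - p.1 ≥ min_width))

-- ===== PRECONDITION & SPEC =====
def Spec_find_frame_ranges (empty_columns : List Bool) (min_gap : Int) (min_width : Int) (out : List (Int × Int)) : Prop := out = find_frame_ranges_alt empty_columns min_gap min_width
instance (empty_columns : List Bool) (min_gap : Int) (min_width : Int) (out : List (Int × Int)) : Decidable (Spec_find_frame_ranges empty_columns min_gap min_width out) := by unfold Spec_find_frame_ranges; infer_instance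

-- ===== CLAIM (what is proved, stated in full; the proofs are below) =====
def Claim_equal_find_frame_ranges : Prop := ∀ (empty_columns : List Bool) (min_gap : Int) (min_width : Int), Dom_find_frame_ranges empty_columns min_gap min_width → Spec_find_frame_ranges empty_columns min_gap min_width (find_frame_ranges empty_columns min_gap min_width)

-- ===== LEMMAS AND PROOFS =====

-- the trailing-gap fixup of A's first pass, as a function of n and the loop state
def pvFix1 (mg : Int) (n : Nat) (st : List Bool × Option Nat) : List Bool :=
  match st.2 with
  | none => st.1
  | some gs => if ((n : Int) - (gs : Int)) ≥ mg then pA_mark st.1 gs n else st.1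

-- the gap mask A's first pass computes, element-structured; w = width of pending gap
def pvSpecMask (mg : Int) : List Bool → Nat → List Bool
  | [], w => List.replicate w (decide (mg ≤ (w : Int)))
  | true :: l, w => pvSpecMask mg l (w + 1)
  | false :: l, w =>
      List.replicate w (decide (mg ≤ (w : Int))) ++ false :: pvSpecMask mg l 0

-- the gap mask, run-structured (mirrors pB_rle)
def pvBlocks (mg : Int) : List Bool → List Bool
  | [] => []
  | v :: rest =>
    let k := (rest.takeWhile (fun b => b == v)).length
    List.replicate (k + 1) (v && decide (mg ≤ ((k + 1 : Nat) : Int))) ++ pvBlocks mg (rest.drop k)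
termination_by l => l.length
decreasing_by simp

theorem pvEnumFrom_append {α : Type} (a b : List α) : ∀ i,
    pvEnumFrom i (a ++ b) = pvEnumFrom i a ++ pvEnumFrom (i + a.length) b := by
  induction a with
  | nil => intro i; simp [pvEnumFrom]
  | cons x t ih =>
      intro i
      simp [pvEnumFrom, ih (i + 1), Nat.add_assoc, Nat.add_comm 1 t.length]

theorem pvSet_at_length (M : List Bool) (x v : Bool) (rest : List Bool) :
    (M ++ x :: rest).set M.length v = M ++ v :: rest := by
  induction M with
  | nil => simp
  | cons a t ih => simp [ih]

theorem pvMark_spec (mg : Int) : ∀ (w t : Nat) (M : List Bool),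
    (List.range' M.length w).foldl (fun l i => l.set i true)
      (M ++ List.replicate (w + t) false)
    = M ++ List.replicate w true ++ List.replicate t false := by
  intro w
  induction w with
  | zero => intro t M; simp
  | succ w ih =>
      intro t M
      rw [List.range'_succ]
      simp only [List.foldl_cons]
      have h1 : (M ++ List.replicate (w + 1 + t) false).set M.length true
          = (M ++ [true]) ++ List.replicate (w + t) false := by
        have : List.replicate (w + 1 + t) false = false :: List.replicate (w + t) false := by
          rw [show w + 1 + t = (w + t) + 1 by omega, List.replicate_succ]
        rw [this, pvSet_at_length]; simp
      rw [h1]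
      have h2 := ih t (M ++ [true])
      simp only [List.length_append, List.length_singleton] at h2
      rw [h2]
      simp [List.replicate_succ]

theorem pvMark_shape (M0 : List Bool) (s i t : Nat) (hM : M0.length = s) :
    pA_mark (M0 ++ List.replicate (i - s + t) false) s i
    = M0 ++ List.replicate (i - s) true ++ List.replicate t false := by
  subst hM
  exact pvMark_spec 0 (i - M0.length) t M0

theorem pvCast_sub (i s : Nat) (h : s ≤ i) : ((i - s : Nat) : Int) = (i : Int) - (s : Int) := by
  omega

theorem pvPass1_Q (mg : Int) : ∀ (l : List Bool) (i s : Nat) (M0 : List Bool) (pend : Option Nat),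
    M0.length = s → s ≤ i → (pend = some s ∨ (pend = none ∧ s = i)) →
    pvFix1 mg (i + l.length)
      ((pvEnumFrom i l).foldl (pA_step1 mg) (M0 ++ List.replicate (i - s + l.length) false, pend))
    = M0 ++ pvSpecMask mg l (i - s) := by
  intro l
  induction l with
  | nil =>
      intro i s M0 pend hM hsi hp
      simp only [List.length_nil, Nat.add_zero, pvEnumFrom, List.foldl_nil]
      rcases hp with hp | ⟨hp, hse⟩
      · subst hp
        simp only [pvFix1]
        by_cases hc : ((i : Nat) : Int) - ((s : Nat) : Int) ≥ mg
        · rw [if_pos hc]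
          have hm := pvMark_shape M0 s i 0 hM
          simp only [Nat.add_zero] at hm
          rw [hm]
          have hdec : decide (mg ≤ ((i - s : Nat) : Int)) = true := by
            simp only [decide_eq_true_eq]
            rw [pvCast_sub i s hsi]
            omega
          simp [pvSpecMask, hdec]
        · rw [if_neg hc]
          have hdec : decide (mg ≤ ((i - s : Nat) : Int)) = false := by
            simp only [decide_eq_false_iff_not]
            rw [pvCast_sub i s hsi]
            omega
          simp [pvSpecMask, hdec]
      · subst hp
        subst hse
        simp [pvFix1, pvSpecMask]
  | cons a l ihl =>
      intro i s M0 pend hM hsi hp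
      simp only [pvEnumFrom, List.foldl_cons, List.length_cons]
      have hn : i + (l.length + 1) = (i + 1) + l.length := by omega
      rw [hn]
      cases a with
      | true =>
          rcases hp with hp | ⟨hp, hse⟩
          · subst hp
            have hstep : pA_step1 mg (M0 ++ List.replicate (i - s + (l.length + 1)) false, some s) (i, true)
                = (M0 ++ List.replicate ((i + 1) - s + l.length) false, some s) := by
              simp only [pA_step1]
              rw [show i - s + (l.length + 1) = (i + 1) - s + l.length by omega]
              simp
            rw [hstep]
            have ih := ihl (i + 1) s M0 (some s) hM (by omega) (Or.inl rfl)
            rw [ih]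
            rw [show (i + 1) - s = (i - s) + 1 by omega]
            simp [pvSpecMask]
          · subst hp
            subst hse
            have hstep : pA_step1 mg (M0 ++ List.replicate (s - s + (l.length + 1)) false, none) (s, true)
                = (M0 ++ List.replicate ((s + 1) - s + l.length) false, some s) := by
              simp only [pA_step1]
              rw [show s - s + (l.length + 1) = (s + 1) - s + l.length by omega]
              simp
            rw [hstep]
            have ih := ihl (s + 1) s M0 (some s) hM (by omega) (Or.inl rfl)
            rw [ih]
            rw [show (s + 1) - s = 1 by omega, show s - s = 0 by omega]
            simp [pvSpecMask]
      | false =>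
          rcases hp with hp | ⟨hp, hse⟩
          · subst hp
            set cb : Bool := decide (mg ≤ ((i - s : Nat) : Int)) with hcb
            have hstep : pA_step1 mg (M0 ++ List.replicate (i - s + (l.length + 1)) false, some s) (i, false)
                = ((M0 ++ List.replicate (i - s) cb ++ [false]) ++ List.replicate l.length false, none) := by
              simp only [pA_step1]
              by_cases hc : ((i : Nat) : Int) - ((s : Nat) : Int) ≥ mg
              · rw [if_pos hc]
                have hm := pvMark_shape M0 s i (l.length + 1) hM
                rw [hm]
                have : cb = true := by
                  rw [hcb]
                  simp only [decide_eq_true_eq]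
                  rw [pvCast_sub i s hsi]
                  omega
                rw [this]
                simp [List.replicate_succ, List.append_assoc]
              · rw [if_neg hc]
                have : cb = false := by
                  rw [hcb]
                  simp only [decide_eq_false_iff_not]
                  rw [pvCast_sub i s hsi]
                  omega
                rw [this]
                rw [show i - s + (l.length + 1) = (i - s) + (1 + l.length) by omega,
                    List.replicate_add, List.replicate_add]
                simp [List.replicate_succ, List.append_assoc]
            rw [hstep]
            have hM' : (M0 ++ List.replicate (i - s) cb ++ [false]).length = i + 1 := by
              simp [hM]
              omega
            have ih := ihl (i + 1) (i + 1) (M0 ++ List.replicate (i - s) cb ++ [false]) none hM'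
              (by omega) (Or.inr ⟨rfl, rfl⟩)
            simp only [Nat.sub_self, Nat.zero_add] at ih
            rw [ih]
            simp only [pvSpecMask, List.append_assoc, List.cons_append, List.nil_append]
            rw [← hcb]
          · subst hp
            subst hse
            have hstep : pA_step1 mg (M0 ++ List.replicate (s - s + (l.length + 1)) false, none) (s, false)
                = ((M0 ++ [false]) ++ List.replicate l.length false, none) := by
              simp only [pA_step1]
              rw [show s - s + (l.length + 1) = 1 + l.length by omega, List.replicate_add]
              simp [List.replicate_succ]
            rw [hstep]
            have hM' : (M0 ++ [false]).length = s + 1 := by simp [hM]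
            have ih := ihl (s + 1) (s + 1) (M0 ++ [false]) none hM' (by omega) (Or.inr ⟨rfl, rfl⟩)
            simp only [Nat.sub_self, Nat.zero_add] at ih
            rw [ih]
            rw [show s - s = 0 by omega]
            simp [pvSpecMask]

theorem pvPass1_eq (ec : List Bool) (mg : Int) :
    pA_pass1 ec mg = pvSpecMask mg ec 0 := by
  have h := pvPass1_Q mg ec 0 0 [] none rfl (Nat.le_refl 0) (Or.inr ⟨rfl, rfl⟩)
  simpa [pA_pass1, pvFix1] using h

theorem pvSpecMask_true_rep (mg : Int) : ∀ (j : Nat) (l : List Bool) (w : Nat),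
    pvSpecMask mg (List.replicate j true ++ l) w = pvSpecMask mg l (w + j) := by
  intro j
  induction j with
  | zero => intro l w; simp
  | succ j ih =>
      intro l w
      rw [List.replicate_succ]
      simp only [List.cons_append, pvSpecMask]
      rw [ih l (w + 1)]
      congr 1
      omega

theorem pvSpecMask_false_rep0 (mg : Int) : ∀ (j : Nat) (l : List Bool),
    pvSpecMask mg (List.replicate j false ++ l) 0 = List.replicate j false ++ pvSpecMask mg l 0 := by
  intro j
  induction j with
  | zero => intro l; simp
  | succ j ih =>
      intro l
      rw [List.replicate_succ]
      simp only [List.cons_append, pvSpecMask]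
      rw [ih l]
      simp [List.replicate_succ]

-- decomposition of a list into its first run and the rest
theorem pvDrop_tw (v : Bool) (rest : List Bool) :
    rest.drop (rest.takeWhile (fun b => b == v)).length = rest.dropWhile (fun b => b == v) := by
  have h := List.takeWhile_append_dropWhile (p := fun b => b == v) (l := rest)
  calc rest.drop (rest.takeWhile (fun b => b == v)).length
      = ((rest.takeWhile (fun b => b == v)) ++ (rest.dropWhile (fun b => b == v))).drop
          (rest.takeWhile (fun b => b == v)).length := by rw [h]
    _ = rest.dropWhile (fun b => b == v) := by rw [List.drop_left]

theorem pvRest_decomp (v : Bool) (rest : List Bool) :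
    rest = List.replicate (rest.takeWhile (fun b => b == v)).length v
      ++ rest.drop (rest.takeWhile (fun b => b == v)).length := by
  have htw : rest.takeWhile (fun b => b == v)
      = List.replicate (rest.takeWhile (fun b => b == v)).length v := by
    apply List.eq_replicate_of_mem
    intro a ha
    simpa using List.mem_takeWhile_imp ha
  have htake : rest.take (rest.takeWhile (fun b => b == v)).length
      = rest.takeWhile (fun b => b == v) :=
    (List.prefix_iff_eq_take.mp (List.takeWhile_prefix _)).symm
  conv_lhs => rw [← List.take_append_drop (rest.takeWhile (fun b => b == v)).length rest]
  rw [htake, htw]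
  simp

theorem pvRun_decomp (v : Bool) (rest : List Bool) :
    v :: rest = List.replicate ((rest.takeWhile (fun b => b == v)).length + 1) v
      ++ rest.drop (rest.takeWhile (fun b => b == v)).length := by
  rw [List.replicate_succ]
  conv_lhs => rw [pvRest_decomp v rest]
  simp

theorem pvRun_head (v : Bool) (rest : List Bool) (b : Bool) (t : List Bool)
    (h : rest.drop (rest.takeWhile (fun b => b == v)).length = b :: t) : b = !v := by
  rw [pvDrop_tw] at h
  have := List.head?_dropWhile_not (fun b => b == v) rest
  rw [h] at this
  simp at this
  cases v <;> cases b <;> simp_all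

theorem pvSpecMask_eq_blocks_aux (mg : Int) : ∀ (n : Nat) (l : List Bool), l.length ≤ n →
    pvSpecMask mg l 0 = pvBlocks mg l := by
  intro n
  induction n with
  | zero =>
      intro l hl
      have : l = [] := List.eq_nil_of_length_eq_zero (Nat.le_zero.mp hl)
      subst this
      simp [pvSpecMask, pvBlocks]
  | succ n ih =>
      intro l hl
      match l with
      | [] => simp [pvSpecMask, pvBlocks]
      | v :: rest =>
        have hblocks : pvBlocks mg (v :: rest)
            = List.replicate ((rest.takeWhile (fun b => b == v)).length + 1)
                (v && decide (mg ≤ (((rest.takeWhile (fun b => b == v)).length + 1 : Nat) : Int)))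
              ++ pvBlocks mg (rest.drop (rest.takeWhile (fun b => b == v)).length) := by
          rw [pvBlocks]
        have hlen : (rest.drop (rest.takeWhile (fun b => b == v)).length).length ≤ n := by
          simp only [List.length_drop]
          simp at hl
          omega
        have ih' := ih _ hlen
        cases v with
        | true =>
            have h1 : pvSpecMask mg (true :: rest) 0
                = pvSpecMask mg (rest.drop (rest.takeWhile (fun b => b == true)).length)
                    ((rest.takeWhile (fun b => b == true)).length + 1) := by
              conv_lhs => rw [pvRun_decomp true rest]
              rw [pvSpecMask_true_rep]
              norm_num
            rw [h1, hblocks]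
            cases hr : rest.drop (rest.takeWhile (fun b => b == true)).length with
            | nil =>
                simp [pvSpecMask, pvBlocks]
            | cons b t =>
                have hb : b = false := by simpa using pvRun_head true rest b t hr
                subst hb
                rw [hr] at ih'
                rw [← ih']
                simp [pvSpecMask]
        | false =>
            have h1 : pvSpecMask mg (false :: rest) 0
                = false :: pvSpecMask mg rest 0 := by
              simp [pvSpecMask]
            rw [h1, hblocks]
            conv_lhs => rw [pvRest_decomp false rest]
            rw [pvSpecMask_false_rep0, ih']
            simp [List.replicate_succ]

theorem pvSpecMask_eq_blocks (mg : Int) : ∀ (l : List Bool),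
    pvSpecMask mg l 0 = pvBlocks mg l := fun l => pvSpecMask_eq_blocks_aux mg l.length l (Nat.le_refl _)

theorem pvStep2_stable (S : List (Int × Int) × Option Nat) (i x : Nat) (c : Bool) :
    pA_step2 (pA_step2 S (i, c)) (x, c) = pA_step2 S (i, c) := by
  cases c <;> rcases S with ⟨rs, _ | f⟩ <;> simp [pA_step2]

theorem pvFold2_const {c : Bool} : ∀ (m j : Nat) (S' : List (Int × Int) × Option Nat),
    (∀ x, pA_step2 S' (x, c) = S') →
    (pvEnumFrom j (List.replicate m c)).foldl pA_step2 S' = S' := by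
  intro m
  induction m with
  | zero => intro j S' _; simp [pvEnumFrom]
  | succ m ih =>
      intro j S' h
      rw [List.replicate_succ]
      simp only [pvEnumFrom, List.foldl_cons, h j]
      exact ih (j + 1) S' h

theorem pvFold2_rep (m i : Nat) (c : Bool) (S : List (Int × Int) × Option Nat) :
    (pvEnumFrom i (List.replicate (m + 1) c)).foldl pA_step2 S = pA_step2 S (i, c) := by
  rw [List.replicate_succ]
  simp only [pvEnumFrom, List.foldl_cons]
  exact pvFold2_const m (i + 1) (pA_step2 S (i, c)) (fun x => pvStep2_stable S i x c)

theorem pvStep_match (mg : Int) (S : List (Int × Int) × Option Nat) (v : Bool) (i k : Nat) :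
    pB_step mg S (v, i, i + k + 1) = pA_step2 S (i, v && decide (mg ≤ ((k + 1 : Nat) : Int))) := by
  rcases S with ⟨rs, fs⟩
  have hd : decide ((((i + k + 1 : Nat) : Int) - ((i : Nat) : Int)) ≥ mg)
      = decide (mg ≤ ((k + 1 : Nat) : Int)) := by
    rw [decide_eq_decide]
    push_cast
    constructor <;> intro <;> omega
  cases v
  · rcases fs with _ | f <;> simp [pB_step, pA_step2]
  · cases hdec : decide (mg ≤ ((k + 1 : Nat) : Int)) <;>
      rcases fs with _ | f <;>
      simp [pB_step, pA_step2, hd, hdec]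
    all_goals (simp at hdec; omega)

theorem pvFold2_eq_aux (mg : Int) : ∀ (n : Nat) (l : List Bool), l.length ≤ n →
    ∀ (i : Nat) (S : List (Int × Int) × Option Nat),
    (pvEnumFrom i (pvBlocks mg l)).foldl pA_step2 S
    = (pB_rle l i).foldl (pB_step mg) S := by
  intro n
  induction n with
  | zero =>
      intro l hl i S
      have : l = [] := List.eq_nil_of_length_eq_zero (Nat.le_zero.mp hl)
      subst this
      simp [pvBlocks, pB_rle, pvEnumFrom]
  | succ n ih =>
      intro l hl i S
      match l with
      | [] => simp [pvBlocks, pB_rle, pvEnumFrom]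
      | v :: rest =>
        have hblocks : pvBlocks mg (v :: rest)
            = List.replicate ((rest.takeWhile (fun b => b == v)).length + 1)
                (v && decide (mg ≤ (((rest.takeWhile (fun b => b == v)).length + 1 : Nat) : Int)))
              ++ pvBlocks mg (rest.drop (rest.takeWhile (fun b => b == v)).length) := by
          rw [pvBlocks]
        have hrle : pB_rle (v :: rest) i
            = (v, i, i + (rest.takeWhile (fun b => b == v)).length + 1)
              :: pB_rle (rest.drop (rest.takeWhile (fun b => b == v)).length)
                  (i + (rest.takeWhile (fun b => b == v)).length + 1) := by
          rw [pB_rle]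
        have hlen : (rest.drop (rest.takeWhile (fun b => b == v)).length).length ≤ n := by
          simp only [List.length_drop]
          simp at hl
          omega
        rw [hblocks, hrle, pvEnumFrom_append, List.foldl_append, List.foldl_cons,
            pvFold2_rep, List.length_replicate, ← pvStep_match,
            ih _ hlen]
        congr 2

theorem pvFold2_eq (mg : Int) : ∀ (l : List Bool) (i : Nat) (S : List (Int × Int) × Option Nat),
    (pvEnumFrom i (pvBlocks mg l)).foldl pA_step2 S
    = (pB_rle l i).foldl (pB_step mg) S := fun l i S =>
  pvFold2_eq_aux mg l.length l (Nat.le_refl _) i S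

-- ===== VERDICT (by name: the statement is the Claim_ definition above) =====
theorem find_frame_ranges_spec : Claim_equal_find_frame_ranges := by
  intro ec mg mw _
  have hst : (pvEnumFrom 0 (pA_pass1 ec mg)).foldl pA_step2 ([], none)
      = (pB_rle ec 0).foldl (pB_step mg) ([], none) := by
    rw [pvPass1_eq, pvSpecMask_eq_blocks, pvFold2_eq]
  unfold Spec_find_frame_ranges
  simp only [find_frame_ranges, find_frame_ranges_alt, hst]
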